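-- pv_equiv track=rewrite | github.com/JavierLopezC/FAA | Practica3/Clasificador.py | normalizaDatos
-- ===== SOURCE A (Python) =====
-- def normalizaDatos(dataset, diccionario):
--     datos_norm = []
--     atrib_counts = []
--     for key in diccionario:
--         if key == "Class":
--             atrib_counts.append(1)
--             continue
--         count = 0
--         for _ in diccionario[key]:
--             count += 1
--         atrib_counts.append(count)
--
--     for dato in dataset:
--         dato_norm = ""
--         for i in range(0, len(atrib_counts)-1):
--             for j in range(0, atrib_counts[i]):
--                 if dato[i] == j:
--                     dato_norm += '1'
--                 else:
--                     dato_norm += '0'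
--         dato_norm += str(dato[-1])
--         datos_norm.append(dato_norm)
--     return datos_norm
-- ===== SOURCE B (Python) =====
-- def normalizaDatos(dataset, diccionario):
--     # Column-major pass: for each non-final attribute, precompute a table of
--     # one-hot block strings and extend every row's parts list with a lookup.
--     rows = [[] for _ in dataset]
--     keys = list(diccionario)
--     for i in range(len(keys) - 1):
--         key = keys[i]
--         c = 1 if key == "Class" else len(diccionario[key])
--         if c == 0:
--             continue
--         zeros = '0' * c
--         memo = {v: '0' * v + '1' + '0' * (c - v - 1) for v in range(c)}
--         rows = [parts + [memo.get(dato[i], zeros)]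
--                 for parts, dato in zip(rows, dataset)]
--     return [''.join(parts) + str(dato[-1]) for parts, dato in zip(rows, dataset)]
-- ===== Notes on version B (the rewrite author's own statement) =====
-- stated objective: alternative
-- what changed: B traverses column-major instead of row-major: for each non-class attribute it precomputes a dict mapping value -> one-hot block string and extends every row via a single dict lookup (zip over rows), so A's inner compare-every-j loop and its row-by-row string growth disappear.
import Mathlib
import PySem

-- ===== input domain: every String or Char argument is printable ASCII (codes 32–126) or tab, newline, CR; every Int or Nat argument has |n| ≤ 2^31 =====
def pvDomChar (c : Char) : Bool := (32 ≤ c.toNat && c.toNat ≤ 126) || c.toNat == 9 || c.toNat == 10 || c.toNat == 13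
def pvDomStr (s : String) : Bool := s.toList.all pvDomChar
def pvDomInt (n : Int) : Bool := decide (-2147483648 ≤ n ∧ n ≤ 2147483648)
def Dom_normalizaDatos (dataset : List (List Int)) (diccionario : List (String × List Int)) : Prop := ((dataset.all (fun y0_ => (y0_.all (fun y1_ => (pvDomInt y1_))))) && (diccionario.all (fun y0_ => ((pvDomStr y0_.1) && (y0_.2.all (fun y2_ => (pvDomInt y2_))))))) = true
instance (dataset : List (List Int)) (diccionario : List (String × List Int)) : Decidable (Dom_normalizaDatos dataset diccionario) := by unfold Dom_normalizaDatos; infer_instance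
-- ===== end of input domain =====

-- B encodes column-major with a precomputed value→block-string table per attribute, instead of
-- A's row-major inner loop comparing the value with every category index; objective: alternative.

-- ===== PORT A =====
def normalizaDatos (dataset : List (List Int)) (diccionario : List (String × List Int)) : List String :=
  let atrib_counts : List Int := diccionario.foldl (fun ac kv =>
    if kv.1 == "Class" then ac ++ [(1 : Int)]
    else ac ++ [((PySem.Dict.mk diccionario).getD kv.1 []).foldl (fun c _ => c + 1) 0]) []
  dataset.foldl (fun dn dato =>
    let dato_norm := (PySem.List.pyRange 0 ((atrib_counts.length : Int) - 1) 1).foldl (fun s i =>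
      (PySem.List.pyRange 0 (PySem.List.pyGetD atrib_counts i 0) 1).foldl (fun s j =>
        if PySem.List.pyGetD dato i 0 == j then s ++ "1" else s ++ "0") s) ""
    dn ++ [dato_norm ++ PySem.Int.toStr (PySem.List.pyGetD dato (-1) 0)]) []

-- ===== PORT B =====
def normalizaDatos_alt (dataset : List (List Int)) (diccionario : List (String × List Int)) : List String :=
  let keys := diccionario.map Prod.fst
  let rows := (List.range (keys.length - 1)).foldl (fun rows i =>
    let key := keys.getD i ""
    let c : Nat := if key == "Class" then 1 else ((PySem.Dict.mk diccionario).getD key []).length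
    if c = 0 then rows
    else
      let zeros := String.ofList (List.replicate c '0')
      let memo : PySem.Dict Int String := PySem.Dict.mk ((List.range c).map (fun v =>
        (Int.ofNat v, String.ofList (List.replicate v '0' ++ '1' :: List.replicate (c - v - 1) '0'))))
      List.zipWith (fun parts dato =>
        parts ++ [memo.getD (PySem.List.pyGetD dato (i : Int) 0) zeros]) rows dataset)
    (dataset.map (fun _ => ([] : List String)))
  List.zipWith (fun parts dato =>
    PySem.Str.join "" parts ++ PySem.Int.toStr (PySem.List.pyGetD dato (-1) 0)) rows dataset

-- ===== PRECONDITION & SPEC =====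
-- attribute count of the i-th entry of the dictionary, as A computes it (1 for "Class", else the value's length)
def pvCount (diccionario : List (String × List Int)) (i : Nat) : Nat :=
  match diccionario[i]? with
  | some kv => if kv.1 = "Class" then 1 else ((PySem.Dict.mk diccionario).getD kv.1 []).length
  | none => 0

-- Pre_ excludes exactly the inputs where Python A raises an IndexError: an empty row (dato[-1]),
-- or a row too short for some non-final attribute with a positive count (dato[i] inside the inner loop).
def Pre_normalizaDatos (dataset : List (List Int)) (diccionario : List (String × List Int)) : Prop :=
  ∀ dato ∈ dataset, dato ≠ [] ∧
    ∀ i < diccionario.length - 1, 0 < pvCount diccionario i → i < dato.length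
instance (dataset : List (List Int)) (diccionario : List (String × List Int)) : Decidable (Pre_normalizaDatos dataset diccionario) := by unfold Pre_normalizaDatos; infer_instance

def pvWitness_normalizaDatos : List (List Int) × (List (String × List Int)) :=
  ([[0, 1]], [("a", [0, 1]), ("Class", [])])

def Spec_normalizaDatos (dataset : List (List Int)) (diccionario : List (String × List Int)) (out : List String) : Prop := out = normalizaDatos_alt dataset diccionario
instance (dataset : List (List Int)) (diccionario : List (String × List Int)) (out : List String) : Decidable (Spec_normalizaDatos dataset diccionario out) := by unfold Spec_normalizaDatos; infer_instance

-- ===== CLAIM (what is proved, stated in full; the proofs are below) =====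
def Claim_equal_normalizaDatos : Prop := ∀ (dataset : List (List Int)) (diccionario : List (String × List Int)), Dom_normalizaDatos dataset diccionario → Pre_normalizaDatos dataset diccionario → Spec_normalizaDatos dataset diccionario (normalizaDatos dataset diccionario)

-- ===== LEMMAS AND PROOFS =====

-- the one-hot block of width n for value v, as a list of chars
def pvBlk (v : Int) (n : Nat) : List Char :=
  if 0 ≤ v ∧ v < (n : Int) then (List.replicate n '0').set v.toNat '1' else List.replicate n '0'

theorem pvBlk_succ (v : Int) (n : Nat) :
    pvBlk v (n + 1) = pvBlk v n ++ [if v == (n : Int) then '1' else '0'] := by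
  unfold pvBlk
  by_cases hv : 0 ≤ v
  · by_cases hn : v = (n : Int)
    · subst hn
      simp [List.replicate_succ' (n := n)]
    · by_cases hlt : v < (n : Int)
      · have h1 : v < ((n : Int) + 1) := by omega
        have h2 : v.toNat < n := by omega
        simp [hv, hlt, h1, hn, List.replicate_succ' (n := n), h2]
      · have h1 : ¬ v < ((n : Int) + 1) := by omega
        simp [hv, hlt, h1, hn, List.replicate_succ' (n := n)]
  · have h1 : ¬ v = (n : Int) := by omega
    simp [hv, h1, List.replicate_succ' (n := n)]

theorem inter_nil_cons (x : List Char) (xs : List (List Char)) :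
    List.intercalate [] (x :: xs) = x ++ List.intercalate [] xs := by
  cases xs with
  | nil => simp [List.intercalate]
  | cons y ys => simp [List.intercalate, List.intersperse]

theorem join_empty_nil : PySem.Str.join "" ([] : List String) = "" := by
  rw [← String.toList_inj]; simp [PySem.Str.toList_join, PySem.Chars.join_nil]

theorem join_empty_cons (x : String) (xs : List String) :
    PySem.Str.join "" (x :: xs) = x ++ PySem.Str.join "" xs := by
  rw [← String.toList_inj]; simp [PySem.Str.toList_join, PySem.Chars.join, inter_nil_cons]

theorem foldl_str_append {α : Type} (g : α → String) (l : List α) (s : String) :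
    l.foldl (fun s x => s ++ g x) s = s ++ PySem.Str.join "" (l.map g) := by
  induction l generalizing s with
  | nil => simp [join_empty_nil]
  | cons x xs ih => simp [join_empty_cons, ih, String.append_assoc]

theorem inner_fold_nat (v : Int) (n : Nat) (s : String) :
    (List.range n).foldl (fun (s : String) (k : Nat) => if v == ((0 : Int) + (k : Int)) then s ++ "1" else s ++ "0") s
    = s ++ String.ofList (pvBlk v n) := by
  induction n with
  | zero => rw [← String.toList_inj]; simp [pvBlk]
  | succ m ih =>
    rw [List.range_succ, List.foldl_append, ih]
    rw [← String.toList_inj]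
    by_cases h : v = (m : Int)
    · simp [pvBlk_succ, h]
    · have hb : (v == ((0:Int) + (m : Int))) = false := by simp; omega
      simp [pvBlk_succ, h]

theorem inner_fold (v c : Int) (s : String) :
    (PySem.List.pyRange 0 c 1).foldl (fun s j => if v == j then s ++ "1" else s ++ "0") s
    = s ++ String.ofList (pvBlk v c.toNat) := by
  rw [PySem.List.pyRange_one, List.foldl_map]
  have h2 : (c - 0).toNat = c.toNat := by omega
  rw [h2]
  exact inner_fold_nat v c.toNat s

theorem foldl_count_len {α : Type} (l : List α) (a : Int) :
    l.foldl (fun c _ => c + 1) a = a + l.length := by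
  induction l generalizing a with
  | nil => simp
  | cons x xs ih => simp [ih]; omega

theorem countsA (full : List (String × List Int)) (d : List (String × List Int)) (ac : List Int) :
    d.foldl (fun ac kv =>
      if kv.1 == "Class" then ac ++ [(1 : Int)]
      else ac ++ [((PySem.Dict.mk full).getD kv.1 []).foldl (fun c _ => c + 1) 0]) ac
    = ac ++ d.map (fun kv =>
        if kv.1 == "Class" then (1 : Int) else (((PySem.Dict.mk full).getD kv.1 []).length : Int)) := by
  induction d generalizing ac with
  | nil => simp
  | cons kv t ih =>
    by_cases h : kv.1 == "Class"
    · have h' : kv.1 = "Class" := by simpa using h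
      rw [List.foldl_cons, if_pos h, ih]; simp [h']
    · have h' : ¬ kv.1 = "Class" := by simpa using h
      rw [List.foldl_cons, if_neg (by simpa using h), ih]; simp [h', foldl_count_len]

-- A's row, reduced to a join of per-attribute one-hot blocks
theorem row_eq (counts : List Int) (dato : List Int) :
    (PySem.List.pyRange 0 ((counts.length : Int) - 1) 1).foldl (fun s i =>
        (PySem.List.pyRange 0 (PySem.List.pyGetD counts i 0) 1).foldl (fun s j =>
          if PySem.List.pyGetD dato i 0 == j then s ++ "1" else s ++ "0") s) ""
      ++ PySem.Int.toStr (PySem.List.pyGetD dato (-1) 0)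
    = PySem.Str.join "" ((List.range (counts.length - 1)).map (fun (i : Nat) =>
        String.ofList (pvBlk (PySem.List.pyGetD dato (i : Int) 0) (counts.getD i 0).toNat)))
      ++ PySem.Int.toStr (PySem.List.pyGetD dato (-1) 0) := by
  rw [PySem.List.pyRange_one, List.foldl_map]
  have hm : ((counts.length : Int) - 1 - 0).toNat = counts.length - 1 := by omega
  rw [hm]
  simp only [inner_fold, zero_add, PySem.List.pyGetD_natCast]
  rw [foldl_str_append]
  simp

-- B-SIDE LEMMAS --------------------------------------------------------------

theorem set_replicate (k c : Nat) (h : k < c) :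
    (List.replicate c '0').set k '1' = List.replicate k '0' ++ '1' :: List.replicate (c - k - 1) '0' := by
  induction k generalizing c with
  | zero =>
    cases c with
    | zero => omega
    | succ c' => simp [List.replicate_succ]
  | succ m ih =>
    cases c with
    | zero => omega
    | succ c' =>
      have := ih c' (by omega)
      simp [List.replicate_succ, this]

-- first-match lookup in the memo dict built from a range of fresh integer keys
theorem memo_get? (f : Nat → String) :
    ∀ (c a : Nat) (v : Int),
    (PySem.Dict.mk ((List.range' a c).map (fun k => (Int.ofNat k, f k)))).get? v
    = if (a : Int) ≤ v ∧ v < (a : Int) + (c : Int) then some (f v.toNat) else none := by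
  intro c
  induction c with
  | zero =>
    intro a v
    have hf : ¬((a : Int) ≤ v ∧ v < (a : Int) + ((0 : Nat) : Int)) := by push_cast; omega
    rw [if_neg hf]
    rfl
  | succ m ih =>
    intro a v
    rw [List.range'_succ, List.map_cons, PySem.Dict.get?_mk_cons, ih]
    by_cases h : (a : Int) = v
    · have hv : v.toNat = a := by omega
      have : ((a : Int) ≤ v ∧ v < (a : Int) + ((m : Int) + 1)) := by omega
      simp [h, hv]
    · have hb : (Int.ofNat a == v) = false := by simp [Int.ofNat_eq_natCast]; omega
      rw [hb]
      simp only [Bool.false_eq_true, if_false]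
      split_ifs with h1 h2 <;> first | rfl | (exfalso; push_cast at *; omega)

theorem memo_getD (c : Nat) (v : Int) (z : String) (f : Nat → String) :
    (PySem.Dict.mk ((List.range c).map (fun k => (Int.ofNat k, f k)))).getD v z
    = if 0 ≤ v ∧ v < (c : Int) then f v.toNat else z := by
  rw [PySem.Dict.getD_eq_get?_getD, List.range_eq_range', memo_get? f c 0 v]
  split_ifs with h h2 h2 <;> simp_all <;> omega

-- B's looked-up block string equals A's pvBlk block, for a positive count
theorem memo_blk (c : Nat) (hc : c ≠ 0) (v : Int) :
    (PySem.Dict.mk ((List.range c).map (fun k =>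
        (Int.ofNat k, String.ofList (List.replicate k '0' ++ '1' :: List.replicate (c - k - 1) '0'))))).getD
      v (String.ofList (List.replicate c '0'))
    = String.ofList (pvBlk v c) := by
  rw [memo_getD]
  unfold pvBlk
  by_cases h : 0 ≤ v ∧ v < (c : Int)
  · have hk : v.toNat < c := by omega
    rw [if_pos h, if_pos h, set_replicate _ _ hk]
  · rw [if_neg h, if_neg h]

theorem zipWith_left {α β : Type} (l₁ : List α) (l₂ : List β) (h : l₁.length = l₂.length) :
    List.zipWith (fun p (_ : β) => p) l₁ l₂ = l₁ := by
  induction l₁ generalizing l₂ with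
  | nil => simp
  | cons x xs ih =>
    cases l₂ with
    | nil => simp at h
    | cons y ys => simp at h ⊢; exact ih ys h

theorem zipWith_zipWith {α β γ δ : Type} (g : α → β → γ) (h : γ → β → δ) (a : List α) (b : List β) :
    List.zipWith h (List.zipWith g a b) b = List.zipWith (fun x y => h (g x y) y) a b := by
  induction a generalizing b with
  | nil => simp
  | cons x xs ih =>
    cases b with
    | nil => simp
    | cons y ys => simp [ih]

theorem zipWith_map_left {α β γ : Type} (g : α → β) (h : β → α → γ) (l : List α) :
    List.zipWith h (l.map g) l = l.map (fun d => h (g d) d) := by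
  induction l with
  | nil => simp
  | cons x xs ih => simp [ih]

-- the column-major fold over rows, characterised as a per-row map
theorem fold_port (dataset : List (List Int)) (cnat : Nat → Nat) (bstr : Nat → List Int → String) :
    ∀ (cols : List Nat) (rows : List (List String)), rows.length = dataset.length →
    cols.foldl (fun rows i => if cnat i = 0 then rows
        else List.zipWith (fun p d => p ++ [bstr i d]) rows dataset) rows
    = List.zipWith (fun p d =>
        p ++ (cols.filter (fun i => !(cnat i == 0))).map (fun i => bstr i d)) rows dataset := by
  intro cols
  induction cols with
  | nil =>
    intro rows h
    simp only [List.foldl_nil, List.filter_nil, List.map_nil, List.append_nil]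
    exact (zipWith_left rows dataset h).symm
  | cons i cs ih =>
    intro rows h
    rw [List.foldl_cons]
    by_cases hc : cnat i = 0
    · rw [if_pos hc, ih rows h, List.filter_cons]
      simp [hc]
    · rw [if_neg hc]
      have hlen : (List.zipWith (fun p d => p ++ [bstr i d]) rows dataset).length = dataset.length := by
        simp [h]
      rw [ih _ hlen, zipWith_zipWith, List.filter_cons]
      have : (!(cnat i == 0)) = true := by simp [hc]
      rw [this]
      simp

-- join over the filtered B blocks = join over all A blocks (skipped columns contribute "")
theorem join_filter (l : List Nat) (P : Nat → Bool) (f g : Nat → String)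
    (h : ∀ i ∈ l, if P i then f i = g i else g i = "") :
    PySem.Str.join "" ((l.filter P).map f) = PySem.Str.join "" (l.map g) := by
  induction l with
  | nil => simp
  | cons i t ih =>
    have hi := h i (by simp)
    have ht : ∀ j ∈ t, if P j then f j = g j else g j = "" := fun j hj => h j (by simp [hj])
    by_cases hp : P i
    · simp only [hp, if_true] at hi
      rw [List.filter_cons_of_pos hp]
      rw [List.map_cons, List.map_cons, join_empty_cons, join_empty_cons, hi, ih ht]
    · have hpf : P i = false := by simpa using hp
      simp only [hpf, Bool.false_eq_true, if_false] at hi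
      rw [List.filter_cons_of_neg (by simp [hpf])]
      rw [List.map_cons, join_empty_cons, hi, ih ht]
      rw [← String.toList_inj]; simp

theorem getD_map_fst (d : List (String × List Int)) (i : Nat) (h : i < d.length) :
    (d.map Prod.fst).getD i "" = (d.getD i ("", [])).1 := by
  rw [List.getD_eq_getElem?_getD, List.getD_eq_getElem?_getD, List.getElem?_map]
  rw [List.getElem?_eq_getElem (by simpa using h)]
  simp [List.getElem?_eq_getElem h]

theorem getD_map_counts (d : List (String × List Int)) (i : Nat) (h : i < d.length)
    (fc : (String × List Int) → Int) :
    (d.map fc).getD i 0 = fc (d.getD i ("", [])) := by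
  rw [List.getD_eq_getElem?_getD, List.getD_eq_getElem?_getD, List.getElem?_map]
  rw [List.getElem?_eq_getElem (by simpa using h)]
  simp [List.getElem?_eq_getElem h]

-- B's per-column count and block-string lookup, as the port computes them (proof abbreviations)
def pvCnt (diccionario : List (String × List Int)) (i : Nat) : Nat :=
  if (diccionario.map Prod.fst).getD i "" == "Class" then 1
  else ((PySem.Dict.mk diccionario).getD ((diccionario.map Prod.fst).getD i "") []).length

def pvBstr (diccionario : List (String × List Int)) (i : Nat) (d : List Int) : String :=
  (PySem.Dict.mk ((List.range (pvCnt diccionario i)).map (fun v =>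
      (Int.ofNat v, String.ofList (List.replicate v '0' ++ '1' ::
        List.replicate (pvCnt diccionario i - v - 1) '0'))))).getD
    (PySem.List.pyGetD d (i : Int) 0)
    (String.ofList (List.replicate (pvCnt diccionario i) '0'))

theorem alt_unfold (dataset : List (List Int)) (diccionario : List (String × List Int)) :
    normalizaDatos_alt dataset diccionario
    = List.zipWith (fun parts dato =>
        PySem.Str.join "" parts ++ PySem.Int.toStr (PySem.List.pyGetD dato (-1) 0))
      ((List.range ((diccionario.map Prod.fst).length - 1)).foldl (fun rows i =>
          if pvCnt diccionario i = 0 then rows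
          else List.zipWith (fun p d => p ++ [pvBstr diccionario i d]) rows dataset)
        (dataset.map (fun _ => ([] : List String)))) dataset := rfl

-- ===== VERDICT (by name: the statement is the Claim_ definition above) =====
theorem normalizaDatos_spec : Claim_equal_normalizaDatos := by
  intro dataset diccionario _ _
  unfold Spec_normalizaDatos normalizaDatos
  rw [countsA diccionario diccionario [], List.nil_append]
  rw [PySem.List.foldl_append_singleton_eq_map, List.nil_append]
  rw [alt_unfold,
      fold_port dataset (pvCnt diccionario) (pvBstr diccionario) _ _ (by simp)]
  rw [zipWith_map_left, zipWith_map_left]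
  apply List.map_congr_left
  intro dato _
  rw [row_eq]
  simp only [List.nil_append, List.length_map]

  congr 1
  apply (join_filter _ _ _ _ _).symm
  intro i hi
  simp only [List.mem_range] at hi
  have hid : i < diccionario.length := by omega
  set kv := diccionario.getD i ("", []) with hkv
  have hkey : (diccionario.map Prod.fst).getD i "" = kv.1 := getD_map_fst diccionario i hid
  have hcnt : (diccionario.map (fun kv =>
      if kv.1 == "Class" then (1 : Int) else (((PySem.Dict.mk diccionario).getD kv.1 []).length : Int))).getD i 0
      = (if kv.1 == "Class" then (1 : Int) else (((PySem.Dict.mk diccionario).getD kv.1 []).length : Int)) :=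
    getD_map_counts diccionario i hid _
  have hcn : pvCnt diccionario i
      = (if kv.1 == "Class" then 1 else ((PySem.Dict.mk diccionario).getD kv.1 []).length) := by
    unfold pvCnt; rw [hkey]
  have hc2 : ((diccionario.map (fun kv =>
      if kv.1 == "Class" then (1 : Int) else (((PySem.Dict.mk diccionario).getD kv.1 []).length : Int))).getD i 0).toNat
      = pvCnt diccionario i := by
    rw [hcnt, hcn]; split_ifs <;> simp
  by_cases hc : pvCnt diccionario i = 0
  · have hb : (!(pvCnt diccionario i == 0)) = false := by simp [hc]
    rw [hb]
    simp only [Bool.false_eq_true, if_false]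
    rw [hc2, hc]
    rw [← String.toList_inj]; simp [pvBlk]
  · have hb : (!(pvCnt diccionario i == 0)) = true := by simp [hc]
    rw [hb]
    simp only [if_true]
    unfold pvBstr
    rw [memo_blk _ hc, hc2]
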